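-- pv_equiv track=rewrite | github.com/songjayhyun/Algorithm | 백준/Silver/2503. 숫자 야구/숫자 야구.py | cal_ball
-- ===== SOURCE A (Python) =====
-- def cal_ball(l1, l2):
--     ball = 0
--
--     for a,b in zip(l1, l2):
--         if a == b:
--             continue
--         else:
--             if a in l2:
--                 ball += 1
--     return ball
-- ===== SOURCE B (Python) =====
-- def cal_ball(l1, l2):
--     present = sum(1 for a, b in zip(l1, l2) if a in l2)
--     strikes = sum(1 for a, b in zip(l1, l2) if a == b)
--     return present - strikes
-- ===== Notes on version B (the rewrite author's own statement) =====
-- stated objective: alternative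
-- what changed: Replaces the branchy single loop by two aggregate counts over zip (digits of l1 present in l2, and exact positional matches) combined by subtraction, using that a positional match is always present.
import Mathlib
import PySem

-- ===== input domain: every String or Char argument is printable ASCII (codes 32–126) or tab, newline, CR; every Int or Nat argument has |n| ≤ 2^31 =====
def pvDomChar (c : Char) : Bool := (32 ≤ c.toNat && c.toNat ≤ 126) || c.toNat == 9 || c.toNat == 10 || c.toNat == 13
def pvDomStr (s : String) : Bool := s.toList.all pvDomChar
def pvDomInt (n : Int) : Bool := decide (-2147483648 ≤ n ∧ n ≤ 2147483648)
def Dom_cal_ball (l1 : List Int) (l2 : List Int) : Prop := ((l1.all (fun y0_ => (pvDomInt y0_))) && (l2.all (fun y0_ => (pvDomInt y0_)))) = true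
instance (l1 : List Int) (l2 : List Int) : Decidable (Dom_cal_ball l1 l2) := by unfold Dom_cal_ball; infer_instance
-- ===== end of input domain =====

-- B replaces A's branchy single loop by two aggregate counts over zip combined by subtraction (objective: alternative).


-- ===== PORT A =====
-- loop over zip(l1,l2): if a == b continue; else if a in l2 then ball += 1
def cal_ball (l1 : List Int) (l2 : List Int) : Int :=
  (List.zip l1 l2).foldl
    (fun ball ab =>
      if ab.1 == ab.2 then ball
      else if l2.contains ab.1 then ball + 1 else ball)
    (0 : Int)

-- ===== PORT B =====
-- present = sum(1 for a,b in zip if a in l2); strikes = sum(1 for a,b in zip if a == b); present - strikes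
def cal_ball_alt (l1 : List Int) (l2 : List Int) : Int :=
  let present : Int :=
    (List.zip l1 l2).foldl (fun s ab => if l2.contains ab.1 then s + 1 else s) (0 : Int)
  let strikes : Int :=
    (List.zip l1 l2).foldl (fun s ab => if ab.1 == ab.2 then s + 1 else s) (0 : Int)
  present - strikes

-- ===== PRECONDITION & SPEC =====
def Spec_cal_ball (l1 : List Int) (l2 : List Int) (out : Int) : Prop := out = cal_ball_alt l1 l2
instance (l1 : List Int) (l2 : List Int) (out : Int) : Decidable (Spec_cal_ball l1 l2 out) := by unfold Spec_cal_ball; infer_instance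

-- ===== CLAIM (what is proved, stated in full; the proofs are below) =====
def Claim_equal_cal_ball : Prop := ∀ (l1 : List Int) (l2 : List Int), Dom_cal_ball l1 l2 → Spec_cal_ball l1 l2 (cal_ball l1 l2)

-- ===== LEMMAS AND PROOFS =====

-- accumulator shift for any fold step that adds a per-element delta
theorem foldl_shift (f : Int → Int × Int → Int) (hf : ∀ acc ab, f acc ab = acc + f 0 ab)
    (zs : List (Int × Int)) (s : Int) :
    zs.foldl f s = s + zs.foldl f 0 := by
  induction zs generalizing s with
  | nil => simp
  | cons z zs ih =>
    simp only [List.foldl_cons]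
    rw [ih (f s z), ih (f 0 z), hf s z]; ring

-- pointwise identity folded up: on pairs whose second component is in l2,
-- ball-count = present-count − strike-count
theorem key (l2 : List Int) (zs : List (Int × Int))
    (h : ∀ ab ∈ zs, ab.2 ∈ l2) :
    zs.foldl (fun ball ab => if ab.1 == ab.2 then ball
                else if l2.contains ab.1 then ball + 1 else ball) (0 : Int)
      = zs.foldl (fun s ab => if l2.contains ab.1 then s + 1 else s) (0 : Int)
        - zs.foldl (fun s ab => if ab.1 == ab.2 then s + 1 else s) (0 : Int) := by
  have hA : ∀ (acc : Int) (ab : Int × Int),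
      (if ab.1 == ab.2 then acc else if l2.contains ab.1 then acc + 1 else acc)
        = acc + (if ab.1 == ab.2 then (0:Int) else if l2.contains ab.1 then 0 + 1 else 0) := by
    intro acc ab; split_ifs <;> ring
  have hP : ∀ (acc : Int) (ab : Int × Int),
      (if l2.contains ab.1 then acc + 1 else acc)
        = acc + (if l2.contains ab.1 then (0:Int) + 1 else 0) := by
    intro acc ab; split_ifs <;> ring
  have hS : ∀ (acc : Int) (ab : Int × Int),
      (if ab.1 == ab.2 then acc + 1 else acc)
        = acc + (if ab.1 == ab.2 then (0:Int) + 1 else 0) := by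
    intro acc ab; split_ifs <;> ring
  induction zs with
  | nil => simp
  | cons z zs ih =>
    have hz : z.2 ∈ l2 := h z (List.mem_cons_self ..)
    have hrest : ∀ ab ∈ zs, ab.2 ∈ l2 := fun ab hab => h ab (List.mem_cons_of_mem _ hab)
    simp only [List.foldl_cons]
    rw [foldl_shift _ hA, foldl_shift _ hP, foldl_shift _ hS, ih hrest]
    by_cases he : z.1 = z.2
    · have hc : l2.contains z.1 = true := by
        rw [List.contains_iff_mem]; exact he ▸ hz
      simp [he, hz]
    · simp only [show (z.1 == z.2) = false by simp [he], Bool.false_eq_true, if_false]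
      by_cases hc : l2.contains z.1 = true <;> simp [hc] <;> ring

-- ===== VERDICT =====
theorem cal_ball_spec : Claim_equal_cal_ball := by
  intro l1 l2 _
  unfold Spec_cal_ball cal_ball cal_ball_alt
  have h : ∀ ab ∈ List.zip l1 l2, ab.2 ∈ l2 := by
    intro ab hab
    exact (List.of_mem_zip hab).2
  exact key l2 (List.zip l1 l2) h
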